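-- pv_equiv track=rewrite | github.com/cohenor28-cmd/zoho-whatsapp-agent | app.py | best_account_match
-- ===== SOURCE A (Python) =====
-- def best_account_match(accounts, search_name):
--     """בוחר את ההתאמה הטובה ביותר מרשימת Accounts.
--     מחזיר: account יחיד אם יש התאמה מדויקת, או None אם יש כמה אפשרויות וצריך לבחור."""
--     if not accounts:
--         return None
--     if len(accounts) == 1:
--         return accounts[0]
--     search_lower = search_name.strip().lower()
--     # עדיפות 1: התאמה מדויקת על חלק בעל הבית (אחרי ' - ')
--     for a in accounts:
--         name = a.get("Account_Name", "")
--         if " - " in name: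
--             landlord_part = name.split(" - ", 1)[1].strip().lower()
--             if landlord_part == search_lower:
--                 return a
--     # עדיפות 2: התאמה מדויקת על שם מלא
--     for a in accounts:
--         if a.get("Account_Name", "").lower() == search_lower:
--             return a
--     # עדיפות 3: סינון למי שמכיל את החיפוש
--     containing = [a for a in accounts if search_lower in a.get("Account_Name", "").lower()]
--     if len(containing) == 1:
--         return containing[0]  # רק אחד מתאים - בחר אוטומטית
--     if len(containing) > 1:
--         return None  # כמה אפשרויות - צריך להציג רשימה
--     return accounts[0]  # אף אחד לא מכיל - בחר ראשון
-- ===== SOURCE B (Python) =====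
-- def best_account_match(accounts, search_name):
--     if not accounts:
--         return None
--     if len(accounts) == 1:
--         return accounts[0]
--     s = search_name.strip().lower()
--     landlord = full = first_containing = None
--     n_containing = 0
--     for a in accounts:
--         name = a.get("Account_Name", "")
--         low = name.lower()
--         if landlord is None and " - " in name and name.split(" - ", 1)[1].strip().lower() == s:
--             landlord = a
--         if full is None and low == s:
--             full = a
--         if s in low:
--             if first_containing is None:
--                 first_containing = a
--             n_containing += 1
--     if landlord is not None:
--         return landlord
--     if full is not None:
--         return full
--     if n_containing == 1:
--         return first_containing
--     if n_containing > 1: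
--         return None
--     return accounts[0]
-- ===== Notes on version B (the rewrite author's own statement) =====
-- stated objective: alternative
-- what changed: A's three sequential scans (landlord-part match, full-name match, substring filter) are fused into a single pass that maintains first landlord hit, first full hit, first containing account and a containing count, with one priority decision after the loop.
import Mathlib
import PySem

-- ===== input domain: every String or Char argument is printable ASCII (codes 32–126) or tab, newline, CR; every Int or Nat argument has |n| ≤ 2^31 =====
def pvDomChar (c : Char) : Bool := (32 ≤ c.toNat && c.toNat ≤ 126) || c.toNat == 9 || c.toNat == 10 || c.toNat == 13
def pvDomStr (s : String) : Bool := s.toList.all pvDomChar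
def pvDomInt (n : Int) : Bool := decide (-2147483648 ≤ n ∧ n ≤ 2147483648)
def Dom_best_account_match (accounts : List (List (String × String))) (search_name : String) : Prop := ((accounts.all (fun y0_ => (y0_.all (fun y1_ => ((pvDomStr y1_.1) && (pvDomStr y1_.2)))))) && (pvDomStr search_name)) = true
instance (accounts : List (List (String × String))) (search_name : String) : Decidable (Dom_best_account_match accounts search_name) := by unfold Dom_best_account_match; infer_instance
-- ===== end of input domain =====

-- B fuses A's three sequential scans into one pass with accumulators; objective: alternative (same cost).

-- shared helpers: the per-account predicates, identical in both Pythons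
-- a.get("Account_Name", "") on the association list
def acctName (a : List (String × String)) : String :=
  (PySem.Dict.mk a).getD "Account_Name" ""

-- ' - ' in name and name.split(' - ', 1)[1].strip().lower() == sl  (the [1] exists under the guard)
def pLand (sl : String) (a : List (String × String)) : Bool :=
  let name := acctName a
  PySem.Str.isIn " - " name &&
    (PySem.Str.lower (PySem.Str.strip
      (PySem.List.pyGetD ((PySem.Str.splitMax? name " - " 1).getD []) 1 "")) == sl)

-- a.get("Account_Name", "").lower() == sl
def pFull (sl : String) (a : List (String × String)) : Bool :=
  PySem.Str.lower (acctName a) == sl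

-- sl in a.get("Account_Name", "").lower()
def pSub (sl : String) (a : List (String × String)) : Bool :=
  PySem.Str.isIn sl (PySem.Str.lower (acctName a))

-- ===== PORT A =====
def best_account_match (accounts : List (List (String × String))) (search_name : String) : Option (List (String × String)) :=
  if accounts.length = 0 then none
  else if accounts.length = 1 then accounts.head?
  else
    let sl := PySem.Str.lower (PySem.Str.strip search_name)
    match accounts.find? (pLand sl) with
    | some a => some a
    | none =>
      match accounts.find? (pFull sl) with
      | some a => some a
      | none =>
        let containing := accounts.filter (pSub sl)
        if containing.length = 1 then containing.head?
        else if containing.length > 1 then none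
        else accounts.head?

-- ===== PORT B =====
-- loop body: update (landlord, full, first_containing, n_containing)
def bStep (sl : String)
    (st : Option (List (String × String)) × Option (List (String × String)) ×
          Option (List (String × String)) × Nat)
    (a : List (String × String)) :
    Option (List (String × String)) × Option (List (String × String)) ×
    Option (List (String × String)) × Nat :=
  let (L, F, C, n) := st
  let L := if L.isNone && pLand sl a then some a else L
  let F := if F.isNone && pFull sl a then some a else F
  if pSub sl a then (L, F, (if C.isNone then some a else C), n + 1)
  else (L, F, C, n)

def best_account_match_alt (accounts : List (List (String × String))) (search_name : String) : Option (List (String × String)) :=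
  match accounts with
  | [] => none
  | [a] => some a
  | _ =>
    let sl := PySem.Str.lower (PySem.Str.strip search_name)
    match accounts.foldl (bStep sl) (none, none, none, 0) with
    | (some a, _, _, _) => some a
    | (none, some a, _, _) => some a
    | (none, none, C, n) =>
      if n = 1 then C
      else if n > 1 then none
      else accounts.head?

-- ===== PRECONDITION & SPEC =====
def Spec_best_account_match (accounts : List (List (String × String))) (search_name : String) (out : Option (List (String × String))) : Prop := out = best_account_match_alt accounts search_name
instance (accounts : List (List (String × String))) (search_name : String) (out : Option (List (String × String))) : Decidable (Spec_best_account_match accounts search_name out) := by unfold Spec_best_account_match; infer_instance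

-- ===== CLAIM (what is proved, stated in full; the proofs are below) =====
def Claim_equal_best_account_match : Prop := ∀ (accounts : List (List (String × String))) (search_name : String), Dom_best_account_match accounts search_name → Spec_best_account_match accounts search_name (best_account_match accounts search_name)

-- ===== LEMMAS AND PROOFS =====

-- loop invariant: the fused fold computes the three first-matches and the count
theorem bLoop_spec (sl : String) (l : List (List (String × String)))
    (L F C : Option (List (String × String))) (n : Nat) :
    l.foldl (bStep sl) (L, F, C, n) =
      (L.orElse (fun _ => l.find? (pLand sl)),
       F.orElse (fun _ => l.find? (pFull sl)),
       C.orElse (fun _ => l.find? (pSub sl)),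
       n + l.countP (pSub sl)) := by
  induction l generalizing L F C n with
  | nil => simp
  | cons a t ih =>
    simp only [List.foldl_cons, List.find?_cons, List.countP_cons, bStep]
    cases L <;> cases F <;> cases C <;>
      by_cases h1 : pLand sl a = true <;> by_cases h2 : pFull sl a = true <;>
      by_cases h3 : pSub sl a = true <;>
      simp [ih, h1, h2, h3, Option.orElse] <;> omega

theorem head?_filter_eq_find? {α : Type} (p : α → Bool) (l : List α) :
    (l.filter p).head? = l.find? p := by
  induction l with
  | nil => rfl
  | cons a t ih =>
    by_cases h : p a = true <;> simp [h, ih]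

-- ===== VERDICT (by name: the statement is the Claim_ definition above) =====
theorem best_account_match_spec : Claim_equal_best_account_match := by
  intro accounts search_name _
  unfold Spec_best_account_match best_account_match best_account_match_alt
  match accounts with
  | [] => rfl
  | [a] => rfl
  | a :: b :: t =>
    rw [if_neg (by simp), if_neg (by simp)]
    simp only [bLoop_spec, Option.orElse, Nat.zero_add]
    cases hL : (a :: b :: t).find? (pLand (PySem.Str.lower (PySem.Str.strip search_name))) with
    | some x => simp
    | none =>
      cases hF : (a :: b :: t).find? (pFull (PySem.Str.lower (PySem.Str.strip search_name))) with
      | some x => simp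
      | none =>
        rw [← head?_filter_eq_find?, ← List.countP_eq_length_filter]
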